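-- pv_equiv track=rewrite | github.com/MrHamdulay/csc3-capstone | examples/data/Assignment_4/bdgmul001/ndom.py | ndom_multiply
-- ===== SOURCE A (Python) =====
-- def ndom_multiply (a, b):
--
--     answera=0
--     a=str(a)
--     exp=len(a)
--     for i in a:
--         exp=exp-1
--         i=int(i)
--         answera =answera+(i*(6**exp))
--
--     answerb=0
--     b=str(b)
--     exp=len(b)
--     for i in b:
--         exp=exp-1
--         i=int(i)
--         answerb =answerb+(i*(6**exp))
--
--     answer = answera *answerb
--
--     quotient=answer
--     newanswer=""
--     while quotient !=0:
--         remainder = quotient%6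
--         quotient =quotient//6
--         remainder=str(remainder)
--         newanswer+=remainder
--     return(newanswer[::-1])
-- ===== SOURCE B (Python) =====
-- def _add(p, q):
--     # digitwise sum of two little-endian digit lists (no carrying here)
--     if not p:
--         return q
--     if not q:
--         return p
--     return [p[0] + q[0]] + _add(p[1:], q[1:])
--
-- def _mul(p, q):
--     # schoolbook long multiplication on little-endian digit lists (no carrying here)
--     if not p:
--         return []
--     return _add([p[0] * y for y in q], [0] + _mul(p[1:], q))
--
-- def ndom_multiply(a, b):
--     da = [int(c) for c in str(a)][::-1]   # base-6 digit lists, least significant first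
--     db = [int(c) for c in str(b)][::-1]
--     prod = _mul(da, db)
--     digits = []                           # one carry-propagation pass normalises to base 6
--     carry = 0
--     for v in prod:
--         carry += v
--         digits.append(carry % 6)
--         carry //= 6
--     while carry != 0:
--         digits.append(carry % 6)
--         carry //= 6
--     while digits and digits[-1] == 0:     # drop high-order zeros (zero product -> "")
--         digits.pop()
--     return ''.join(str(d) for d in reversed(digits))
-- ===== Notes on version B (the rewrite author's own statement) =====
-- stated objective: alternative
-- what changed: B never converts the operands to a single integer and never divides the big product: it multiplies the two little-endian digit lists by schoolbook long multiplication (digitwise convolution via recursive shift-and-add), then makes one carry-propagation pass to normalise to base-6 digits and strips the high-order zeros, whereas A converts both inputs to an integer with a power-sum, multiplies, and rebuilds the string by repeated division.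
import Mathlib
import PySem

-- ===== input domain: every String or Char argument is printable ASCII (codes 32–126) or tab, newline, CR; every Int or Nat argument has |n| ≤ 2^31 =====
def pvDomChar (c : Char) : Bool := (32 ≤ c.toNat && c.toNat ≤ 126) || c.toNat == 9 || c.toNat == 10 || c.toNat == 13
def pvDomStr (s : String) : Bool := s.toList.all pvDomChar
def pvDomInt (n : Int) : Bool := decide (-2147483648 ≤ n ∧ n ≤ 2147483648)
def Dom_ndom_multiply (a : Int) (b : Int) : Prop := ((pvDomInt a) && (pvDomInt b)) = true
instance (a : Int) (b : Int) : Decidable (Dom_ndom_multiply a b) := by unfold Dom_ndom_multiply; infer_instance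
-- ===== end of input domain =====

-- B multiplies the two digit lists directly by schoolbook long multiplication (shift-and-add) and
-- normalises with one carry pass, never forming the big integer product or dividing it: an
-- alternative algorithm of similar cost.

-- ===== PORT A =====
-- int(i) for a single character i (ValueError = none; under Pre_ every character is a digit)
def pvDigitA (c : Char) : Int := (PySem.Int.ofChars? [c]).getD 0

-- the for-loop over str(n): state (exp, answer); exp=exp-1 then answer += int(i)*6**exp
def pvParseA (n : Int) : Int :=
  let cs := PySem.Int.toChars n
  (cs.foldl (fun (st : Int × Int) c => (st.1 - 1, st.2 + pvDigitA c * 6 ^ (st.1 - 1).toNat))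
    ((cs.length : Int), 0)).2

-- while quotient != 0: remainder = q % 6; q = q // 6; newanswer += str(remainder)
-- (guard 'q ≤ 0' makes the recursion total: for q < 0 the Python loop never terminates, unreachable under Pre_)
def pvLoopA (q : Int) (acc : List Char) : List Char :=
  if q ≤ 0 then acc
  else pvLoopA (PySem.Int.floordiv q 6) (acc ++ PySem.Int.toChars (PySem.Int.mod q 6))
termination_by q.toNat
decreasing_by
  rw [PySem.Int.floordiv_eq_ediv_of_pos (by norm_num)]
  omega

def ndom_multiply (a : Int) (b : Int) : String :=
  -- answer = answera * answerb; return newanswer[::-1]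
  String.ofList ((PySem.List.slice? (pvLoopA (pvParseA a * pvParseA b) []) none none (-1)).getD [])

-- ===== PORT B =====
def pvDigitB (c : Char) : Int := (PySem.Int.ofChars? [c]).getD 0

-- _add(p, q): digitwise sum of two little-endian digit lists
def pvAdd : List Int → List Int → List Int
  | [], q => q
  | p, [] => p
  | x :: p, y :: q => (x + y) :: pvAdd p q

-- _mul(p, q): schoolbook long multiplication, recursion on the first list
def pvMul : List Int → List Int → List Int
  | [], _ => []
  | x :: p, q => pvAdd (q.map (fun y => x * y)) (0 :: pvMul p q)

-- [int(c) for c in str(n)][::-1]  (the slice [::-1] of a full list is exactly List.reverse)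
def pvDigitsLE (n : Int) : List Int :=
  ((PySem.Int.toChars n).map pvDigitB).reverse

-- the trailing 'while carry != 0' loop (guard 'c ≤ 0': for negative carry the Python loop never
-- terminates, unreachable under Pre_)
def pvCarryOut (c : Int) : List Int :=
  if c ≤ 0 then []
  else PySem.Int.mod c 6 :: pvCarryOut (PySem.Int.floordiv c 6)
termination_by c.toNat
decreasing_by
  rw [PySem.Int.floordiv_eq_ediv_of_pos (by norm_num)]
  omega

-- the 'for v in prod' carry pass, then the trailing while loop on the final carry
def pvSweep : List Int → Int → List Int
  | [], c => pvCarryOut c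
  | v :: t, c => PySem.Int.mod (c + v) 6 :: pvSweep t (PySem.Int.floordiv (c + v) 6)

-- while digits and digits[-1] == 0: digits.pop()
def pvPopZeros (l : List Int) : List Int :=
  if h : l ≠ [] ∧ PySem.List.pyGetD l (-1) 0 = 0 then pvPopZeros l.dropLast else l
termination_by l.length
decreasing_by
  have := List.length_pos_of_ne_nil h.1
  simp only [List.length_dropLast]
  omega

def ndom_multiply_alt (a : Int) (b : Int) : String :=
  -- ''.join(str(d) for d in reversed(digits))
  String.ofList
    (((pvPopZeros (pvSweep (pvMul (pvDigitsLE a) (pvDigitsLE b)) 0)).reverse).flatMap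
      PySem.Int.toChars)

-- ===== PRECONDITION & SPEC =====
-- A (and B alike) raises ValueError on a negative argument: str(n) then contains '-', and int('-') fails.
def Pre_ndom_multiply (a : Int) (b : Int) : Prop := 0 ≤ a ∧ 0 ≤ b
instance (a : Int) (b : Int) : Decidable (Pre_ndom_multiply a b) := by unfold Pre_ndom_multiply; infer_instance
def pvWitness_ndom_multiply : Int × Int := (25, 3)

def Spec_ndom_multiply (a : Int) (b : Int) (out : String) : Prop := out = ndom_multiply_alt a b
instance (a : Int) (b : Int) (out : String) : Decidable (Spec_ndom_multiply a b out) := by unfold Spec_ndom_multiply; infer_instance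

-- ===== CLAIM (what is proved, stated in full; the proofs are below) =====
def Claim_equal_ndom_multiply : Prop := ∀ (a : Int) (b : Int), Dom_ndom_multiply a b → Pre_ndom_multiply a b → Spec_ndom_multiply a b (ndom_multiply a b)

-- ===== LEMMAS AND PROOFS =====

-- value of a little-endian digit list (proof-only)
def pvValL : List Int → Int
  | [] => 0
  | d :: t => d + 6 * pvValL t

-- canonical little-endian base-6 digits of a value (proof-only)
def pvCDig (v : Int) : List Int :=
  if v ≤ 0 then []
  else PySem.Int.mod v 6 :: pvCDig (PySem.Int.floordiv v 6)
termination_by v.toNat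
decreasing_by
  rw [PySem.Int.floordiv_eq_ediv_of_pos (by norm_num)]
  omega

theorem opt_nonneg (X : Option Nat) : 0 ≤ (X.bind fun a => some ((a : Int))).getD 0 := by
  cases X <;> simp

theorem digitB_nonneg (c : Char) : 0 ≤ pvDigitB c := by
  unfold pvDigitB PySem.Int.ofChars?
  by_cases hs : PySem.Int.isIntSpace c
  · simp [hs]; apply opt_nonneg
  · simp [hs]
    split
    · rename_i h
      obtain ⟨rfl, rfl⟩ := List.cons_eq_cons.mp h.symm
      decide
    · apply opt_nonneg
    · apply opt_nonneg

theorem pvDigit_eq (c : Char) : pvDigitA c = pvDigitB c := rfl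

-- ---- values ----

theorem val_add (p q : List Int) : pvValL (pvAdd p q) = pvValL p + pvValL q := by
  induction p generalizing q with
  | nil => simp [pvAdd, pvValL]
  | cons x p ih =>
    cases q with
    | nil => simp [pvAdd, pvValL]
    | cons y q => simp [pvAdd, pvValL, ih]; ring

theorem val_scale (x : Int) (q : List Int) :
    pvValL (q.map (fun y => x * y)) = x * pvValL q := by
  induction q with
  | nil => simp [pvValL]
  | cons y q ih => simp [pvValL, ih]; ring

theorem val_mul (p q : List Int) : pvValL (pvMul p q) = pvValL p * pvValL q := by
  induction p with
  | nil => simp [pvMul, pvValL]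
  | cons x p ih =>
    simp [pvMul, val_add, val_scale, pvValL, ih]; ring

theorem val_append (p q : List Int) :
    pvValL (p ++ q) = pvValL p + 6 ^ p.length * pvValL q := by
  induction p with
  | nil => simp [pvValL]
  | cons x p ih => simp [pvValL, ih]; ring

-- Horner with an arbitrary accumulator
theorem horner_shift (l : List Int) (a : Int) :
    l.foldl (fun acc d => acc * 6 + d) a
      = a * 6 ^ l.length + l.foldl (fun acc d => acc * 6 + d) 0 := by
  induction l generalizing a with
  | nil => simp
  | cons d t ih =>
    simp only [List.foldl_cons, List.length_cons]
    rw [ih (a * 6 + d), ih (0 * 6 + d)]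
    ring

theorem val_reverse (l : List Int) :
    pvValL l.reverse = l.foldl (fun acc d => acc * 6 + d) 0 := by
  induction l with
  | nil => simp [pvValL]
  | cons x t ih =>
    simp only [List.reverse_cons, List.foldl_cons]
    rw [val_append, ih, horner_shift t (0 * 6 + x)]
    simp [pvValL]
    ring

-- A's power-sum fold (started at exp = length) computes the Horner value
theorem pvParse_fold_eq (l : List Char) (acc : Int) :
    (l.foldl (fun (st : Int × Int) c => (st.1 - 1, st.2 + pvDigitA c * 6 ^ (st.1 - 1).toNat))
      ((l.length : Int), acc)).2
      = acc + (l.map pvDigitA).foldl (fun a d => a * 6 + d) 0 := by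
  induction l generalizing acc with
  | nil => simp
  | cons c t ih =>
    simp only [List.foldl_cons, List.length_cons, List.map_cons]
    push_cast
    simp only [add_sub_cancel_right, Int.toNat_natCast]
    rw [ih, horner_shift (t.map pvDigitA) (0 + pvDigitA c)]
    simp only [List.length_map]
    ring

theorem parse_eq_val (n : Int) : pvParseA n = pvValL (pvDigitsLE n) := by
  unfold pvParseA pvDigitsLE
  rw [pvParse_fold_eq, val_reverse, List.foldl_map, List.foldl_map]
  simp only [pvDigit_eq, zero_add]

-- ---- digit ranges ----

theorem digitsLE_nonneg (n : Int) : ∀ d ∈ pvDigitsLE n, 0 ≤ d := by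
  intro d hd
  unfold pvDigitsLE at hd
  rw [List.mem_reverse] at hd
  obtain ⟨c, _, rfl⟩ := List.mem_map.mp hd
  exact digitB_nonneg c

theorem add_nonneg_mem (p q : List Int) (hp : ∀ d ∈ p, 0 ≤ d) (hq : ∀ d ∈ q, 0 ≤ d) :
    ∀ d ∈ pvAdd p q, 0 ≤ d := by
  induction p generalizing q with
  | nil => simpa [pvAdd] using hq
  | cons x p ih =>
    cases q with
    | nil => simpa [pvAdd] using hp
    | cons y q =>
      intro d hd
      simp only [pvAdd, List.mem_cons] at hd
      rcases hd with rfl | hd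
      · have := hp x (by simp); have := hq y (by simp); omega
      · exact ih q (fun d h => hp d (List.mem_cons_of_mem _ h))
          (fun d h => hq d (List.mem_cons_of_mem _ h)) d hd

theorem mul_nonneg_mem (p q : List Int) (hp : ∀ d ∈ p, 0 ≤ d) (hq : ∀ d ∈ q, 0 ≤ d) :
    ∀ d ∈ pvMul p q, 0 ≤ d := by
  induction p with
  | nil => simp [pvMul]
  | cons x p ih =>
    refine add_nonneg_mem _ _ ?_ ?_
    · intro d hd
      obtain ⟨y, hy, rfl⟩ := List.mem_map.mp hd
      exact mul_nonneg (hp x (by simp)) (hq y hy)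
    · intro d hd
      rcases List.mem_cons.mp hd with rfl | hd
      · exact le_refl 0
      · exact ih (fun d h => hp d (List.mem_cons_of_mem _ h)) d hd

theorem val_nonneg (l : List Int) (h : ∀ d ∈ l, 0 ≤ d) : 0 ≤ pvValL l := by
  induction l with
  | nil => simp [pvValL]
  | cons x t ih =>
    have := h x (by simp)
    have := ih (fun d hd => h d (by simp [hd]))
    simp [pvValL]; omega

theorem carryOut_val (c : Int) (hc : 0 ≤ c) : pvValL (pvCarryOut c) = c := by
  rw [pvCarryOut]
  split
  · simp [pvValL]; omega
  · rename_i h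
    have h6 : (0:Int) < 6 := by norm_num
    rw [pvValL, carryOut_val _ (by rw [PySem.Int.floordiv_eq_ediv_of_pos h6]; omega)]
    rw [PySem.Int.floordiv_eq_ediv_of_pos h6, PySem.Int.mod_eq_emod_of_pos h6]
    omega
termination_by c.toNat
decreasing_by
  rw [PySem.Int.floordiv_eq_ediv_of_pos (by norm_num)]
  omega

theorem sweep_val (l : List Int) (c : Int) (hc : 0 ≤ c) (hl : ∀ d ∈ l, 0 ≤ d) :
    pvValL (pvSweep l c) = c + pvValL l := by
  induction l generalizing c with
  | nil => simp [pvSweep, pvValL, carryOut_val c hc]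
  | cons v t ih =>
    have hv : 0 ≤ v := hl v (by simp)
    have h6 : (0:Int) < 6 := by norm_num
    have hcv : 0 ≤ PySem.Int.floordiv (c + v) 6 := by
      rw [PySem.Int.floordiv_eq_ediv_of_pos h6]; omega
    rw [pvSweep, pvValL, ih _ hcv (fun d hd => hl d (by simp [hd])), pvValL]
    rw [PySem.Int.floordiv_eq_ediv_of_pos h6, PySem.Int.mod_eq_emod_of_pos h6]
    omega

theorem carryOut_range (c : Int) : ∀ d ∈ pvCarryOut c, 0 ≤ d ∧ d < 6 := by
  rw [pvCarryOut]
  split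
  · simp
  · intro d hd
    rcases List.mem_cons.mp hd with rfl | hd
    · exact ⟨PySem.Int.mod_nonneg _ (by norm_num), PySem.Int.mod_lt _ (by norm_num)⟩
    · exact carryOut_range _ d hd
termination_by c.toNat
decreasing_by
  rw [PySem.Int.floordiv_eq_ediv_of_pos (by norm_num)]
  omega

theorem sweep_range (l : List Int) (c : Int) : ∀ d ∈ pvSweep l c, 0 ≤ d ∧ d < 6 := by
  induction l generalizing c with
  | nil => exact carryOut_range c
  | cons v t ih =>
    intro d hd
    rcases List.mem_cons.mp hd with rfl | hd
    · exact ⟨PySem.Int.mod_nonneg _ (by norm_num), PySem.Int.mod_lt _ (by norm_num)⟩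
    · exact ih _ d hd

-- ---- the pop loop is dropWhile-zeros on the reverse ----

theorem popZeros_eq (l : List Int) :
    pvPopZeros l = (l.reverse.dropWhile (· == (0:Int))).reverse := by
  induction l using List.reverseRecOn with
  | nil => simp [pvPopZeros]
  | append_singleton M d ih =>
    rw [pvPopZeros]
    have hget : PySem.List.pyGetD (M ++ [d]) (-1) 0 = d :=
      PySem.List.pyGetD_neg_one_append_singleton M d 0
    by_cases hd : d = 0
    · subst hd
      rw [dif_pos ⟨by simp, hget⟩, List.dropLast_concat, ih, List.reverse_append]
      simp
    · rw [dif_neg (by simp [hget, hd]), List.reverse_append]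
      simp [hd]

-- ---- canonical digits are unique ----

theorem val_pos_of_last (L : List Int) (hr : ∀ d ∈ L, 0 ≤ d)
    (hne : L ≠ []) (hlast : L.getLast hne ≠ 0) : 0 < pvValL L := by
  induction L with
  | nil => exact absurd rfl hne
  | cons x T ih =>
    cases T with
    | nil =>
      have := hr x (by simp)
      simp [List.getLast] at hlast
      simp [pvValL]; omega
    | cons y T' =>
      have hT : 0 < pvValL (y :: T') := by
        apply ih (fun d hd => hr d (by simp [List.mem_cons] at hd ⊢; tauto)) (by simp)
        rwa [List.getLast_cons_cons] at hlast
      have hx := hr x (by simp)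
      have hv : pvValL (x :: y :: T') = x + 6 * pvValL (y :: T') := rfl
      omega

theorem cdig_val (L : List Int) (hr : ∀ d ∈ L, 0 ≤ d ∧ d < 6)
    (hlast : ∀ h : L ≠ [], L.getLast h ≠ 0) : pvCDig (pvValL L) = L := by
  induction L with
  | nil => simp [pvValL, pvCDig]
  | cons x T ih =>
    have hx := hr x (by simp)
    have hTr : ∀ d ∈ T, 0 ≤ d ∧ d < 6 := fun d hd => hr d (by simp [hd])
    have hTval : 0 ≤ pvValL T := val_nonneg T (fun d hd => (hTr d hd).1)
    have hpos : 0 < pvValL (x :: T) := by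
      cases T with
      | nil =>
        have := hlast (by simp)
        simp [List.getLast] at this
        simp [pvValL]; omega
      | cons y T' =>
        have : 0 < pvValL (y :: T') := by
          apply val_pos_of_last _ (fun d hd => (hTr d hd).1) (by simp)
          have := hlast (by simp)
          rwa [List.getLast_cons_cons] at this
        have hv : pvValL (x :: y :: T') = x + 6 * pvValL (y :: T') := rfl
        omega
    have h6 : (0:Int) < 6 := by norm_num
    have hv : pvValL (x :: T) = x + 6 * pvValL T := rfl
    rw [pvCDig, if_neg (by omega)]
    have hmod : PySem.Int.mod (pvValL (x :: T)) 6 = x := by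
      rw [PySem.Int.mod_eq_emod_of_pos h6, hv]; omega
    have hdiv : PySem.Int.floordiv (pvValL (x :: T)) 6 = pvValL T := by
      rw [PySem.Int.floordiv_eq_ediv_of_pos h6, hv]; omega
    rw [hmod, hdiv]
    congr 1
    cases T with
    | nil => simp [pvValL, pvCDig]
    | cons y T' =>
      apply ih hTr
      intro h
      have := hlast (by simp)
      rwa [List.getLast_cons_cons] at this

-- stripping the high-order zeros of an in-range digit list yields the canonical digits
theorem strip_eq_cdig (D : List Int) (hr : ∀ d ∈ D, 0 ≤ d ∧ d < 6) :
    (D.reverse.dropWhile (· == (0:Int))).reverse = pvCDig (pvValL D) := by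
  induction D using List.reverseRecOn with
  | nil => simp [pvValL, pvCDig]
  | append_singleton M d ih =>
    have hM : ∀ x ∈ M, 0 ≤ x ∧ x < 6 := fun x hx => hr x (by simp [hx])
    by_cases hd : d = 0
    · subst hd
      rw [List.reverse_append]
      simp only [List.reverse_cons, List.reverse_nil, List.nil_append, List.cons_append,
        List.nil_append] at *
      rw [show ((0:Int) :: M.reverse).dropWhile (· == (0:Int)) = M.reverse.dropWhile (· == (0:Int)) by
        simp]
      rw [ih hM, val_append]
      simp [pvValL]
    · rw [List.reverse_append]
      simp only [List.reverse_cons, List.reverse_nil, List.nil_append, List.cons_append,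
        List.nil_append]
      rw [show (d :: M.reverse).dropWhile (· == (0:Int)) = d :: M.reverse by
        simp [hd]]
      rw [cdig_val (M ++ [d]) hr (by intro h; simp; exact hd)]
      simp

-- a digit below 6 prints as one character, so its str(·) is its own reverse
theorem toChars_rev (d : Int) (h0 : 0 ≤ d) (h6 : d < 6) :
    (PySem.Int.toChars d).reverse = PySem.Int.toChars d := by
  interval_cases d <;> decide

theorem cdig_range (v : Int) : ∀ d ∈ pvCDig v, 0 ≤ d ∧ d < 6 := by
  rw [pvCDig]
  split
  · simp
  · intro d hd
    rcases List.mem_cons.mp hd with rfl | hd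
    · exact ⟨PySem.Int.mod_nonneg _ (by norm_num), PySem.Int.mod_lt _ (by norm_num)⟩
    · exact cdig_range _ d hd
termination_by v.toNat
decreasing_by
  rw [PySem.Int.floordiv_eq_ediv_of_pos (by norm_num)]
  omega

theorem flatMap_congr_mem {α β : Type} (L : List α) (f g : α → List β)
    (h : ∀ d ∈ L, f d = g d) : L.flatMap f = L.flatMap g := by
  induction L with
  | nil => rfl
  | cons x t ih =>
    simp only [List.flatMap_cons, h x (by simp), ih (fun d hd => h d (List.mem_cons_of_mem _ hd))]

theorem cdig_chars_reverse (v : Int) :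
    ((pvCDig v).flatMap PySem.Int.toChars).reverse
      = (pvCDig v).reverse.flatMap PySem.Int.toChars := by
  rw [List.reverse_flatMap]
  apply flatMap_congr_mem
  intro d hd
  rw [List.mem_reverse] at hd
  have hdr := cdig_range v d hd
  simp only [Function.comp]
  exact toChars_rev d hdr.1 hdr.2

-- the while-loop accumulator only ever grows on the right
theorem loopA_acc (q : Int) (acc : List Char) :
    pvLoopA q acc = acc ++ pvLoopA q [] := by
  rw [pvLoopA]
  conv_rhs => rw [pvLoopA]
  split
  · simp
  · rw [loopA_acc _ (acc ++ _), loopA_acc _ ([] ++ _)]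
    simp
termination_by q.toNat
decreasing_by
  all_goals rw [PySem.Int.floordiv_eq_ediv_of_pos (by norm_num)]
  all_goals omega

-- A's while loop emits exactly the canonical digits, least significant first
theorem loopA_eq_cdig (q : Int) :
    pvLoopA q [] = (pvCDig q).flatMap PySem.Int.toChars := by
  rw [pvLoopA, pvCDig]
  split
  · simp
  · rw [loopA_acc, loopA_eq_cdig]
    simp
termination_by q.toNat
decreasing_by
  rw [PySem.Int.floordiv_eq_ediv_of_pos (by norm_num)]
  omega

-- ===== VERDICT (by name: the statement is the Claim_ definition above) =====
theorem ndom_multiply_spec : Claim_equal_ndom_multiply := by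
  intro a b _ _
  unfold Spec_ndom_multiply ndom_multiply ndom_multiply_alt
  rw [PySem.List.slice?_none_none_neg_one]
  simp only [Option.getD_some]
  have hP : ∀ d ∈ pvMul (pvDigitsLE a) (pvDigitsLE b), 0 ≤ d :=
    mul_nonneg_mem _ _ (digitsLE_nonneg a) (digitsLE_nonneg b)
  rw [loopA_eq_cdig, popZeros_eq, strip_eq_cdig _ (sweep_range _ 0),
    sweep_val _ 0 le_rfl hP, val_mul, zero_add, parse_eq_val, parse_eq_val,
    cdig_chars_reverse]
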